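-- pv_equiv track=rewrite | github.com/danielrelman4-sudo/arb-bot | arb_bot/bucket_quality.py | bucket_leg_count_map
-- ===== SOURCE A (Python) =====
-- from typing import Any, Iterable
--
-- def bucket_leg_count_map(group_ids_and_leg_counts: Iterable[tuple[str, int]]) -> dict[str, int]:
--     counts: dict[str, int] = {}
--     for group_id, leg_count in group_ids_and_leg_counts:
--         if not group_id:
--             continue
--         if group_id in counts:
--             counts[group_id] = max(counts[group_id], max(2, int(leg_count)))
--         else:
--             counts[group_id] = max(2, int(leg_count))
--     return counts
-- ===== SOURCE B (Python) =====
-- def bucket_leg_count_map(group_ids_and_leg_counts):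
--     groups: dict[str, list[int]] = {}
--     for group_id, leg_count in group_ids_and_leg_counts:
--         if group_id:
--             groups.setdefault(group_id, []).append(int(leg_count))
--     return {group_id: max(2, max(counts)) for group_id, counts in groups.items()}
-- ===== Notes on version B (the rewrite author's own statement) =====
-- stated objective: alternative
-- what changed: B first groups all leg counts per non-empty group id into lists (one pass building a dict of lists), then a second pass maps each group's list to max(2, max(list)), instead of A's single pass maintaining a running max per key.
import Mathlib
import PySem

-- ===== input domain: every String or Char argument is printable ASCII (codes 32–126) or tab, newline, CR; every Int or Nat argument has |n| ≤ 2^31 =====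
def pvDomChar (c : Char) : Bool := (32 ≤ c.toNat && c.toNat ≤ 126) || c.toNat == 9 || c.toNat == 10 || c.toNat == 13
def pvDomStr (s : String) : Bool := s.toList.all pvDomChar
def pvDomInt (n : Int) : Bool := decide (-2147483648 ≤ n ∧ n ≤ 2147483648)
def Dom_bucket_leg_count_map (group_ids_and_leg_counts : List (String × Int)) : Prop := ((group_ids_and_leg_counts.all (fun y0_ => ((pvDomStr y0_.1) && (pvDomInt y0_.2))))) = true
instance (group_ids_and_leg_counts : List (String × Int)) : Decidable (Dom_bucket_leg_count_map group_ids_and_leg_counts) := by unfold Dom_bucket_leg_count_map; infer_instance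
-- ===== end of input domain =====

-- B groups leg counts per non-empty group id into lists in one pass, then maps each
-- list to max(2, max(list)) in a second pass (alternative decomposition, same cost).


-- ===== PORT A =====
-- loop body of A: skip falsy (empty) group_id; running max per key (int(c) is identity on Int)
def stepA (counts : PySem.Dict String Int) (p : String × Int) : PySem.Dict String Int :=
  if p.1 == "" then counts
  else if counts.contains p.1 then counts.insert p.1 (max (counts.getD p.1 0) (max 2 p.2))
  else counts.insert p.1 (max 2 p.2)

def bucket_leg_count_map (group_ids_and_leg_counts : List (String × Int)) : List (String × Int) :=
  (group_ids_and_leg_counts.foldl stepA PySem.Dict.empty).items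

-- ===== PORT B =====
-- loop body of B: groups.setdefault(gid, []).append(int(c))
def stepB (groups : PySem.Dict String (List Int)) (p : String × Int) : PySem.Dict String (List Int) :=
  if p.1 == "" then groups else groups.modify p.1 [] (· ++ [p.2])

-- {gid: max(2, max(cs)) ...}: Python max(cs) on a nonempty list is PySem.List.max? with identity key
def bucket_leg_count_map_alt (group_ids_and_leg_counts : List (String × Int)) : List (String × Int) :=
  let groups := group_ids_and_leg_counts.foldl stepB PySem.Dict.empty
  groups.items.map (fun p => (p.1, max 2 ((PySem.List.max? p.2 (fun y => y)).getD 2)))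

-- ===== PRECONDITION & SPEC =====
def Spec_bucket_leg_count_map (group_ids_and_leg_counts : List (String × Int)) (out : List (String × Int)) : Prop := out = bucket_leg_count_map_alt group_ids_and_leg_counts
instance (group_ids_and_leg_counts : List (String × Int)) (out : List (String × Int)) : Decidable (Spec_bucket_leg_count_map group_ids_and_leg_counts out) := by unfold Spec_bucket_leg_count_map; infer_instance

-- ===== CLAIM (what is proved, stated in full; the proofs are below) =====
def Claim_equal_bucket_leg_count_map : Prop := ∀ (group_ids_and_leg_counts : List (String × Int)), Dom_bucket_leg_count_map group_ids_and_leg_counts → Spec_bucket_leg_count_map group_ids_and_leg_counts (bucket_leg_count_map group_ids_and_leg_counts)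

-- ===== LEMMAS AND PROOFS =====

-- the per-group value B computes from a list of counts
def fB (p : String × List Int) : String × Int :=
  (p.1, max 2 ((PySem.List.max? p.2 (fun y => y)).getD 2))

-- the dict A maintains, seen as a function of B's dict of lists
def Fd (g : PySem.Dict String (List Int)) : PySem.Dict String Int :=
  PySem.Dict.mk (g.items.map fB)

theorem keys_Fd (g : PySem.Dict String (List Int)) : (Fd g).keys = g.keys := by
  simp [Fd, PySem.Dict.keys, List.map_map, fB, Function.comp]

theorem contains_Fd (g : PySem.Dict String (List Int)) (k : String) :
    (Fd g).contains k = g.contains k := by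
  rw [PySem.Dict.contains_eq_decide_mem_keys, PySem.Dict.contains_eq_decide_mem_keys, keys_Fd]

theorem md_append (cs : List Int) (c : Int) :
    max 2 ((PySem.List.max? (cs ++ [c]) (fun y => y)).getD 2)
      = max (max 2 ((PySem.List.max? cs (fun y => y)).getD 2)) (max 2 c) := by
  cases cs with
  | nil =>
      have h0 : PySem.List.max? ([] : List Int) (fun y => y) = none :=
        (PySem.List.max?_eq_none_iff _ _).mpr rfl
      simp [PySem.List.max?_id_cons, h0]
  | cons x t =>
      simp [PySem.List.max?_id_cons, List.foldl_append]
      omega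

theorem nodup_stepB (g : PySem.Dict String (List Int)) (p : String × Int)
    (h : g.keys.Nodup) : (stepB g p).keys.Nodup := by
  unfold stepB
  split
  · exact h
  · rw [PySem.Dict.keys_modify]
    cases hc : g.contains p.1 with
    | true => rw [PySem.Dict.keys_insert_of_contains _ _ hc]; exact h
    | false =>
        rw [PySem.Dict.keys_insert_of_not_contains _ _ hc]
        refine List.Nodup.append h (List.nodup_singleton _) ?_
        intro a ha hb
        simp at hb; subst hb
        have := (PySem.Dict.contains_iff_mem_keys g p.1).mpr ha
        rw [hc] at this; exact Bool.false_ne_true this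

theorem commute (g : PySem.Dict String (List Int)) (p : String × Int)
    (h : g.keys.Nodup) : stepA (Fd g) p = Fd (stepB g p) := by
  unfold stepA stepB
  by_cases he : p.1 = ""
  · simp [he]
  · simp only [show (p.1 == "") = false by simp [he], Bool.false_eq_true, if_false]
    rw [contains_Fd]
    cases hc : g.contains p.1 with
    | false =>
        simp only [Bool.false_eq_true, if_false]
        apply PySem.Dict.ext
        rw [PySem.Dict.items_insert_of_not_contains _ _ (by rw [contains_Fd]; exact hc)]
        have hc' : (g.modify p.1 [] (· ++ [p.2])).items = g.items ++ [(p.1, g.getD p.1 [] ++ [p.2])] := by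
          unfold PySem.Dict.modify
          exact PySem.Dict.items_insert_of_not_contains _ _ hc
        have hg : g.getD p.1 [] = [] := PySem.Dict.getD_of_not_contains g [] hc
        simp [Fd, hc', fB, hg, PySem.List.max?_id_cons]
    | true =>
        simp only [if_true]
        -- the key is present: both sides replace the entry at p.1 in place
        have hmem : p.1 ∈ g.items.map (·.1) := by
          simpa [PySem.Dict.keys] using (PySem.Dict.contains_iff_mem_keys g p.1).mp hc
        obtain ⟨q, hq, hq1⟩ := List.mem_map.mp hmem
        have hqpair : (p.1, q.2) ∈ g.items := by
          have : q = (p.1, q.2) := by cases q; simp_all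
          rw [← this]; exact hq
        have hgetD : g.getD p.1 [] = q.2 := PySem.Dict.getD_of_mem_items g hqpair h []
        have hFmem : (p.1, max 2 ((PySem.List.max? q.2 (fun y => y)).getD 2)) ∈ (Fd g).items := by
          simp only [Fd]
          exact List.mem_map.mpr ⟨(p.1, q.2), hqpair, rfl⟩
        have hFnodup : (Fd g).keys.Nodup := by rw [keys_Fd]; exact h
        have hFgetD : (Fd g).getD p.1 0 = max 2 ((PySem.List.max? q.2 (fun y => y)).getD 2) :=
          PySem.Dict.getD_of_mem_items _ hFmem hFnodup 0
        apply PySem.Dict.ext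
        rw [PySem.Dict.items_insert_of_contains _ _ (by rw [contains_Fd]; exact hc)]
        have hmodItems : (g.modify p.1 [] (· ++ [p.2])).items
            = g.items.map (fun r => if r.1 == p.1 then (p.1, q.2 ++ [p.2]) else r) := by
          unfold PySem.Dict.modify
          rw [PySem.Dict.items_insert_of_contains _ _ hc, hgetD]
        simp only [Fd, hmodItems, List.map_map]
        apply List.map_congr_left
        intro r hr
        by_cases hr1 : r.1 = p.1
        · have : r = (p.1, q.2) := by
            have hrpair : (p.1, r.2) ∈ g.items := by
              have : r = (p.1, r.2) := by cases r; simp_all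
              rw [← this]; exact hr
            have := PySem.Dict.getD_of_mem_items g hrpair h []
            rw [hgetD] at this
            cases r; simp_all
          subst this
          simp [Function.comp, fB, md_append]
          rw [show (PySem.Dict.mk (List.map fB g.items)).getD p.1 0 = (Fd g).getD p.1 0 from rfl,
            hFgetD]
          omega
        · simp [Function.comp, fB, hr1]

theorem fold_commute (l : List (String × Int)) :
    ∀ g : PySem.Dict String (List Int), g.keys.Nodup →
      l.foldl stepA (Fd g) = Fd (l.foldl stepB g) := by
  induction l with
  | nil => intro g _; rfl
  | cons p t ih =>
      intro g h
      simp only [List.foldl_cons]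
      rw [commute g p h]
      exact ih _ (nodup_stepB g p h)

-- ===== VERDICT (by name: the statement is the Claim_ definition above) =====
theorem bucket_leg_count_map_spec : Claim_equal_bucket_leg_count_map := by
  intro l _
  unfold Spec_bucket_leg_count_map bucket_leg_count_map bucket_leg_count_map_alt
  have h0 : (PySem.Dict.empty : PySem.Dict String Int) = Fd PySem.Dict.empty := rfl
  rw [h0, fold_commute l PySem.Dict.empty (by simp [PySem.Dict.keys, PySem.Dict.empty])]
  simp [Fd, fB]
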